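-- pv_equiv track=rewrite | github.com/diegoDAguilar/juegoDeHundirLaFlota | clases/Tablero.py | rellenar_coordenadas
-- ===== SOURCE A (Python) =====
-- def rellenar_coordenadas(columna, fila, tam_barco, orientacion):
--     coordenadas = []
--     if orientacion == 'n':
--         for i in range(tam_barco):
--             coordenadas.append((columna, fila - i))
--     elif orientacion == 's':
--         for i in range(tam_barco):
--             coordenadas.append((columna, fila + i))
--     elif orientacion == 'e':
--         for i in range(tam_barco):
--             coordenadas.append((columna + i, fila))
--     elif orientacion == 'w':
--         for i in range(tam_barco):
--             coordenadas.append((columna - i, fila))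
--
--     return coordenadas
-- ===== SOURCE B (Python) =====
-- def rellenar_coordenadas(columna, fila, tam_barco, orientacion):
--     pasos = {'n': (0, -1), 's': (0, 1), 'e': (1, 0), 'w': (-1, 0)}
--     if orientacion not in pasos:
--         return []
--     dx, dy = pasos[orientacion]
--     # start at the ship's far end and walk back toward the origin cell,
--     # building the list back-to-front, then reverse once
--     x = columna + dx * (tam_barco - 1)
--     y = fila + dy * (tam_barco - 1)
--     coordenadas = []
--     restante = tam_barco
--     while restante > 0:
--         coordenadas.append((x, y))
--         x -= dx
--         y -= dy
--         restante -= 1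
--     coordenadas.reverse()
--     return coordenadas
-- ===== Notes on version B (the rewrite author's own statement) =====
-- stated objective: alternative
-- what changed: Instead of A's four indexed forward-append loops, B computes the ship's far endpoint once, walks a cursor backward cell by cell building the list back-to-front, and reverses it; there is no loop index and a single loop dispatched by a direction table.
import Mathlib
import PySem

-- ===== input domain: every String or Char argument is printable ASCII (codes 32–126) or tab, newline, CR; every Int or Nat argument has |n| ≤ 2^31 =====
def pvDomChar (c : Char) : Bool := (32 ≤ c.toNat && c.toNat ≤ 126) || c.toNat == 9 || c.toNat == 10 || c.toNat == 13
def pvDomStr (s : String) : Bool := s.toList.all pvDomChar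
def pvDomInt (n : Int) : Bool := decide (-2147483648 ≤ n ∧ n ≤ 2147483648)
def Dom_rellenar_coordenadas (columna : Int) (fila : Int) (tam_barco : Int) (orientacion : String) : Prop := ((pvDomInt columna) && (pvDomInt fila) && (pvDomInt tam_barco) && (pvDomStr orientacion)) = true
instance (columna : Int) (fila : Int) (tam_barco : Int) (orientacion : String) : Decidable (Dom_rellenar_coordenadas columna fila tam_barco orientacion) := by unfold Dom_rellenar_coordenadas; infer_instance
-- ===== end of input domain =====

/-
  B replaces A's four indexed forward-append loops with one backward cursor walk
  from the ship's far endpoint, building the list back-to-front and reversing it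
  (objective: alternative decomposition, same cost).
-/


-- ===== PORT A =====
def rellenar_coordenadas (columna : Int) (fila : Int) (tam_barco : Int) (orientacion : String) : List (Int × Int) :=
  if orientacion == "n" then
    (PySem.List.pyRange 0 tam_barco 1).foldl (fun acc i => acc ++ [(columna, fila - i)]) []
  else if orientacion == "s" then
    (PySem.List.pyRange 0 tam_barco 1).foldl (fun acc i => acc ++ [(columna, fila + i)]) []
  else if orientacion == "e" then
    (PySem.List.pyRange 0 tam_barco 1).foldl (fun acc i => acc ++ [(columna + i, fila)]) []
  else if orientacion == "w" then
    (PySem.List.pyRange 0 tam_barco 1).foldl (fun acc i => acc ++ [(columna - i, fila)]) []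
  else []

-- ===== PORT B =====
-- Source B's direction table 'pasos'
def pvPasos : PySem.Dict String (Int × Int) :=
  PySem.Dict.ofList [("n", ((0 : Int), (-1 : Int))), ("s", (0, 1)), ("e", (1, 0)), ("w", (-1, 0))]

-- Source B's while loop: append the cursor cell, step the cursor backwards, decrement
def pvWalkBack (dx dy x y restante : Int) (acc : List (Int × Int)) : List (Int × Int) :=
  if 0 < restante then
    pvWalkBack dx dy (x - dx) (y - dy) (restante - 1) (acc ++ [(x, y)])
  else acc
termination_by restante.toNat
decreasing_by omega

def rellenar_coordenadas_alt (columna : Int) (fila : Int) (tam_barco : Int) (orientacion : String) : List (Int × Int) :=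
  match pvPasos.get? orientacion with
  | none => []
  | some (dx, dy) =>
      (pvWalkBack dx dy (columna + dx * (tam_barco - 1)) (fila + dy * (tam_barco - 1)) tam_barco []).reverse

-- ===== PRECONDITION & SPEC =====
def Spec_rellenar_coordenadas (columna : Int) (fila : Int) (tam_barco : Int) (orientacion : String) (out : List (Int × Int)) : Prop := out = rellenar_coordenadas_alt columna fila tam_barco orientacion
instance (columna : Int) (fila : Int) (tam_barco : Int) (orientacion : String) (out : List (Int × Int)) : Decidable (Spec_rellenar_coordenadas columna fila tam_barco orientacion out) := by unfold Spec_rellenar_coordenadas; infer_instance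

-- ===== CLAIM (what is proved, stated in full; the proofs are below) =====
def Claim_equal_rellenar_coordenadas : Prop := ∀ (columna : Int) (fila : Int) (tam_barco : Int) (orientacion : String), Dom_rellenar_coordenadas columna fila tam_barco orientacion → Spec_rellenar_coordenadas columna fila tam_barco orientacion (rellenar_coordenadas columna fila tam_barco orientacion)

-- ===== LEMMAS AND PROOFS =====

-- the backward walk, characterised: acc followed by the cells from the cursor stepping back
theorem pvWalkBack_eq_map (dx dy : Int) : ∀ (n : Nat) (x y : Int) (acc : List (Int × Int)),
    pvWalkBack dx dy x y (n : Int) acc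
      = acc ++ (List.range n).map (fun (k : Nat) => (x - dx * (k : Int), y - dy * (k : Int))) := by
  intro n
  induction n with
  | zero => intro x y acc; unfold pvWalkBack; simp
  | succ m ih =>
      intro x y acc
      unfold pvWalkBack
      rw [if_pos (by omega)]
      rw [show ((m + 1 : Nat) : Int) - 1 = (m : Int) by push_cast; ring, ih]
      rw [List.range_succ_eq_map]
      simp only [List.map_cons, List.map_map, List.append_assoc, List.singleton_append,
        Nat.cast_zero, mul_zero, sub_zero]
      congr 1
      congr 1
      apply List.map_congr_left
      intro k _
      simp only [Function.comp_apply, Prod.mk.injEq]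
      constructor <;> (push_cast; ring)

-- reversing a map over range re-indexes from the other end
theorem rev_map_range {α : Type} (f : Nat → α) : ∀ (n : Nat),
    ((List.range n).map f).reverse = (List.range n).map (fun k => f (n - 1 - k)) := by
  intro n
  induction n with
  | zero => simp
  | succ m ih =>
      conv_lhs => rw [List.range_succ]
      conv_rhs => rw [List.range_succ_eq_map]
      rw [List.map_append, List.reverse_append]
      simp only [List.map_cons, List.map_map, List.map_nil, List.reverse_singleton,
        List.singleton_append]
      rw [ih]
      congr 1
      all_goals
        apply List.map_congr_left
        intro k _
        simp only [Function.comp_apply]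
        congr 1
        omega

-- B on a known direction, as a forward map over range
theorem alt_eq_map (dx dy columna fila tam_barco : Int) :
    (pvWalkBack dx dy (columna + dx * (tam_barco - 1)) (fila + dy * (tam_barco - 1)) tam_barco []).reverse
      = (List.range tam_barco.toNat).map (fun (k : Nat) => (columna + dx * (k : Int), fila + dy * (k : Int))) := by
  by_cases h : 0 < tam_barco
  · have hcast : ((tam_barco.toNat : Nat) : Int) = tam_barco := by omega
    conv_lhs => rw [← hcast]
    rw [pvWalkBack_eq_map, List.nil_append, rev_map_range]
    apply List.map_congr_left
    intro k hk
    rw [List.mem_range] at hk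
    have h1 : ((tam_barco.toNat - 1 - k : Nat) : Int) = tam_barco - 1 - k := by omega
    simp only [h1, hcast, Prod.mk.injEq]
    constructor <;> ring
  · have h0 : tam_barco.toNat = 0 := by omega
    rw [h0]
    unfold pvWalkBack
    rw [if_neg (by omega)]
    simp

-- A's per-direction foldl, as the same forward map over range
theorem a_fold_eq_map (g : Int → Int × Int) (tam_barco : Int) :
    (PySem.List.pyRange 0 tam_barco 1).foldl (fun acc i => acc ++ [g i]) []
      = (List.range tam_barco.toNat).map (fun (k : Nat) => g (k : Int)) := by
  rw [PySem.List.foldl_append_singleton_eq_map, List.nil_append, PySem.List.pyRange_one]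
  rw [List.map_map]
  rw [show tam_barco - 0 = tam_barco by ring]
  apply List.map_congr_left
  intro k _
  simp

theorem rc_eq (columna fila tam_barco : Int) (orientacion : String) :
    rellenar_coordenadas columna fila tam_barco orientacion
      = rellenar_coordenadas_alt columna fila tam_barco orientacion := by
  unfold rellenar_coordenadas rellenar_coordenadas_alt
  by_cases hn : orientacion = "n"
  · subst hn
    rw [show pvPasos.get? "n" = some (0, -1) from rfl, if_pos (by decide)]
    dsimp only
    rw [a_fold_eq_map (fun i => (columna, fila - i)), alt_eq_map]
    exact List.map_congr_left (fun k _ => by simp only [Prod.mk.injEq]; constructor <;> ring)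
  by_cases hs : orientacion = "s"
  · subst hs
    rw [show pvPasos.get? "s" = some (0, 1) from rfl, if_neg (by simp), if_pos (by decide)]
    dsimp only
    rw [a_fold_eq_map (fun i => (columna, fila + i)), alt_eq_map]
    exact List.map_congr_left (fun k _ => by simp only [Prod.mk.injEq]; constructor <;> ring)
  by_cases he : orientacion = "e"
  · subst he
    rw [show pvPasos.get? "e" = some (1, 0) from rfl, if_neg (by simp), if_neg (by simp),
      if_pos (by decide)]
    dsimp only
    rw [a_fold_eq_map (fun i => (columna + i, fila)), alt_eq_map]
    exact List.map_congr_left (fun k _ => by simp only [Prod.mk.injEq]; constructor <;> ring)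
  by_cases hw : orientacion = "w"
  · subst hw
    rw [show pvPasos.get? "w" = some (-1, 0) from rfl, if_neg (by simp), if_neg (by simp),
      if_neg (by simp), if_pos (by decide)]
    dsimp only
    rw [a_fold_eq_map (fun i => (columna - i, fila)), alt_eq_map]
    exact List.map_congr_left (fun k _ => by simp only [Prod.mk.injEq]; constructor <;> ring)
  · have hn' : ("n" == orientacion) = false := by simpa using Ne.symm hn
    have hs' : ("s" == orientacion) = false := by simpa using Ne.symm hs
    have he' : ("e" == orientacion) = false := by simpa using Ne.symm he
    have hw' : ("w" == orientacion) = false := by simpa using Ne.symm hw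
    rw [show pvPasos = PySem.Dict.mk [("n", (0, -1)), ("s", (0, 1)), ("e", (1, 0)),
        ("w", (-1, 0))] from rfl]
    simp [PySem.Dict.get?, hn, hs, he, hw, hn', hs', he', hw']

-- ===== VERDICT (by name: the statement is the Claim_ definition above) =====
theorem rellenar_coordenadas_spec : Claim_equal_rellenar_coordenadas := by
  intro columna fila tam_barco orientacion _
  exact rc_eq columna fila tam_barco orientacion
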